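-- pv_equiv track=rewrite | github.com/gremos/Semantic_DB_RAG | interactive/query_interface.py | _find_similar_column
-- ===== SOURCE A (Python) =====
-- from typing import List, Dict, Any, Optional, Tuple
--
-- def _find_similar_column(target_col: str, actual_columns: List[str], category: str) -> Optional[str]:
--     """Find similar column in actual schema"""
--     target_lower = target_col.lower()
--
--     # Category-specific patterns
--     patterns = {
--         'customer': ['customer', 'client', 'account', 'user', 'owner', 'billing'],
--         'amount': ['amount', 'price', 'total', 'value', 'cost', 'fee', 'charge'],
--         'date': ['date', 'time', 'created', 'modified', 'signed', 'started'],
--         'complaint': ['case', 'ticket', 'issue', 'problem', 'type'],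
--         'content': ['description', 'content', 'text', 'message', 'comment']
--     }
--
--     category_patterns = patterns.get(category, [])
--
--     # Look for exact partial matches first
--     for col in actual_columns:
--         col_lower = col.lower()
--         if target_lower in col_lower or col_lower in target_lower:
--             return col
--
--     # Look for pattern matches
--     for col in actual_columns:
--         col_lower = col.lower()
--         for pattern in category_patterns:
--             if pattern in col_lower:
--                 return col
--
--     return None
-- ===== SOURCE B (Python) =====
-- def _find_similar_column(target_col, actual_columns, category):
--     """Single pass: return the first partial match immediately; remember the
--     first pattern match as a fallback returned only after the whole scan."""
--     target_lower = target_col.lower()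
--     patterns = {
--         'customer': ['customer', 'client', 'account', 'user', 'owner', 'billing'],
--         'amount': ['amount', 'price', 'total', 'value', 'cost', 'fee', 'charge'],
--         'date': ['date', 'time', 'created', 'modified', 'signed', 'started'],
--         'complaint': ['case', 'ticket', 'issue', 'problem', 'type'],
--         'content': ['description', 'content', 'text', 'message', 'comment'],
--     }
--     category_patterns = patterns.get(category, [])
--     candidate = None
--     for col in actual_columns:
--         col_lower = col.lower()
--         if target_lower in col_lower or col_lower in target_lower:
--             return col
--         if candidate is None and any(p in col_lower for p in category_patterns):
--             candidate = col
--     return candidate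
-- ===== Notes on version B (the rewrite author's own statement) =====
-- stated objective: simpler
-- what changed: Replaced A's two sequential full scans (partial-match scan, then pattern-match scan) by a single loop that returns a partial match immediately and keeps the first pattern match in a fallback variable returned after the scan.
import Mathlib
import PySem

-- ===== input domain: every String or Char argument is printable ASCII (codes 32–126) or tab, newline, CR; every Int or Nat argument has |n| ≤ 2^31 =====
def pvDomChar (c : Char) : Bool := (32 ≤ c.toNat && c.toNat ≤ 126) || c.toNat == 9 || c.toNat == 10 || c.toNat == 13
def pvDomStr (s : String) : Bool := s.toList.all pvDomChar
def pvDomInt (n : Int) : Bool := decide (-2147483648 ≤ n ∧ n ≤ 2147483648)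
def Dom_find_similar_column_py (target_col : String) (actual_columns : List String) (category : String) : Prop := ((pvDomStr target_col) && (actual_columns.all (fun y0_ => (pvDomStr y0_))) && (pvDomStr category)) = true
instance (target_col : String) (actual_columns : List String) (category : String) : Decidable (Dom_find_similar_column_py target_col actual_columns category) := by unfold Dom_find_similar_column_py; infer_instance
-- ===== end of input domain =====

-- B replaces A's two sequential scans by one pass that returns a partial match
-- immediately and keeps the first pattern match as a fallback (objective: simpler).

-- ===== PORT A =====

-- the literal `patterns` dict (shared data, used by both ports)
def fsc_patterns : PySem.Dict String (List String) := PySem.Dict.mk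
  [("customer", ["customer", "client", "account", "user", "owner", "billing"]),
   ("amount", ["amount", "price", "total", "value", "cost", "fee", "charge"]),
   ("date", ["date", "time", "created", "modified", "signed", "started"]),
   ("complaint", ["case", "ticket", "issue", "problem", "type"]),
   ("content", ["description", "content", "text", "message", "comment"])]

-- A's first loop: first col whose lowercase contains / is contained in target_lower
def fsc_loop1 (target_lower : String) : List String → Option String
  | [] => none
  | col :: rest =>
    let col_lower := PySem.Str.lower col
    if PySem.Str.isIn target_lower col_lower || PySem.Str.isIn col_lower target_lower then
      some col
    else fsc_loop1 target_lower rest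

-- A's inner `for pattern in category_patterns` loop: does any pattern occur in col_lower?
def fsc_inner (col_lower : String) : List String → Bool
  | [] => false
  | p :: rest => if PySem.Str.isIn p col_lower then true else fsc_inner col_lower rest

-- A's second loop: first col matched by a category pattern
def fsc_loop2 (category_patterns : List String) : List String → Option String
  | [] => none
  | col :: rest =>
    let col_lower := PySem.Str.lower col
    if fsc_inner col_lower category_patterns then some col
    else fsc_loop2 category_patterns rest

def find_similar_column_py (target_col : String) (actual_columns : List String) (category : String) : Option String :=
  let target_lower := PySem.Str.lower target_col
  let category_patterns := PySem.Dict.getD fsc_patterns category []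
  match fsc_loop1 target_lower actual_columns with
  | some col => some col
  | none => fsc_loop2 category_patterns actual_columns

-- ===== PORT B =====

-- B's single loop with the fallback accumulator `candidate`
def fsc_scan (target_lower : String) (category_patterns : List String)
    (candidate : Option String) : List String → Option String
  | [] => candidate
  | col :: rest =>
    let col_lower := PySem.Str.lower col
    if PySem.Str.isIn target_lower col_lower || PySem.Str.isIn col_lower target_lower then
      some col
    else
      fsc_scan target_lower category_patterns
        (if candidate.isNone && category_patterns.any (fun p => PySem.Str.isIn p col_lower)
         then some col else candidate) rest

def find_similar_column_py_alt (target_col : String) (actual_columns : List String) (category : String) : Option String :=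
  let target_lower := PySem.Str.lower target_col
  let category_patterns := PySem.Dict.getD fsc_patterns category []
  fsc_scan target_lower category_patterns none actual_columns

-- ===== PRECONDITION & SPEC =====
def Spec_find_similar_column_py (target_col : String) (actual_columns : List String) (category : String) (out : Option String) : Prop := out = find_similar_column_py_alt target_col actual_columns category
instance (target_col : String) (actual_columns : List String) (category : String) (out : Option String) : Decidable (Spec_find_similar_column_py target_col actual_columns category out) := by unfold Spec_find_similar_column_py; infer_instance

-- ===== CLAIM (what is proved, stated in full; the proofs are below) =====
def Claim_equal_find_similar_column_py : Prop := ∀ (target_col : String) (actual_columns : List String) (category : String), Dom_find_similar_column_py target_col actual_columns category → Spec_find_similar_column_py target_col actual_columns category (find_similar_column_py target_col actual_columns category)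

-- ===== LEMMAS AND PROOFS =====

-- A's inner pattern loop is `List.any` of the containment test
lemma fsc_inner_eq_any (cl : String) (pats : List String) :
    fsc_inner cl pats = pats.any (fun p => PySem.Str.isIn p cl) := by
  induction pats with
  | nil => rfl
  | cons p rest ih =>
    simp only [fsc_inner, List.any_cons, ih]
    cases hp : PySem.Str.isIn p cl <;> simp

-- the single pass equals: first loop-1 hit, else the candidate, else the first loop-2 hit
lemma fsc_scan_eq (tl : String) (pats : List String) (cols : List String) (cand : Option String) :
    fsc_scan tl pats cand cols =
      match fsc_loop1 tl cols with
      | some c => some c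
      | none => match cand with
                | some x => some x
                | none => fsc_loop2 pats cols := by
  induction cols generalizing cand with
  | nil => cases cand <;> rfl
  | cons col rest ih =>
    simp only [fsc_scan, fsc_loop1, fsc_loop2, fsc_inner_eq_any]
    by_cases h1 : (PySem.Str.isIn tl (PySem.Str.lower col) || PySem.Str.isIn (PySem.Str.lower col) tl) = true
    · rw [if_pos h1, if_pos h1]
    · rw [if_neg h1, if_neg h1]
      cases cand with
      | some x =>
        simp only [Option.isNone_some, Bool.false_and, Bool.false_eq_true, if_false, ih]
      | none =>
        simp only [Option.isNone_none, Bool.true_and, ih]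
        cases h2 : (pats.any fun p => PySem.Str.isIn p (PySem.Str.lower col)) <;>
          simp only [Bool.false_eq_true, if_false, if_true]

-- ===== VERDICT (by name: the statement is the Claim_ definition above) =====
theorem find_similar_column_py_spec : Claim_equal_find_similar_column_py := by
  intro target_col actual_columns category _
  unfold Spec_find_similar_column_py find_similar_column_py find_similar_column_py_alt
  rw [fsc_scan_eq]
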